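-- pv_equiv track=rewrite | github.com/yrapop01/fable | legacy/tex.py | verb
-- ===== SOURCE A (Python) =====
-- def verb(s):
--     token = ''
--     prev = ''
--     for c in s:
--         if prev == '\\verb':
--             token = prev + c
--             prev = ''
--             continue
--         if not token:
--             if prev:
--                 yield prev
--             prev = c
--             continue
--         if c == '|':
--             yield token + c
--             token = ''
--             continue
--         token += c
--
--     assert not token and prev != '\\verb'
--     yield prev
-- ===== SOURCE B (Python) =====
-- def verb(s):
--     # The \verb/token machinery in the original is dead code (prev is always
--     # '' or one character), so the generator just yields each character,
--     # or a single '' for empty input.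
--     if not s:
--         yield ''
--         return
--     yield from s
-- ===== Notes on version B (the rewrite author's own statement) =====
-- stated objective: simpler
-- what changed: The \verb/token accumulation branches are dead code (prev only ever holds the previous single character and token stays empty), so B drops the whole state machine and simply yields every character of the input in order, keeping the generator's empty-input behaviour.
import Mathlib
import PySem

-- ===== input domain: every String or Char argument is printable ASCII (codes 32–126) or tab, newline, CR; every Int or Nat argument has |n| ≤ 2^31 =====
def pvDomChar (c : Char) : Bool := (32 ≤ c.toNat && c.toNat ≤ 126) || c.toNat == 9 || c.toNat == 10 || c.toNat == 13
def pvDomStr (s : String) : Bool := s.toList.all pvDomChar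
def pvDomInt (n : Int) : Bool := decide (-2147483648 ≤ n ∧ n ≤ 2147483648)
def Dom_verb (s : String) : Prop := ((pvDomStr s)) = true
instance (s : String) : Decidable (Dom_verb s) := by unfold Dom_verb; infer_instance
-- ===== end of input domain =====

-- B removes the dead \verb/token state machine of A and just yields each character
-- (a single '' for empty input); objective: simpler, same cost.


-- ===== PORT A =====
-- state: (yielded so far, token, prev); one step = one loop iteration of A
def verbStep (st : List String × String × String) (c : Char) : List String × String × String :=
  let (out, token, prev) := st
  if prev = "\\verb" then
    (out, prev.push c, "")
  else if token = "" then
    (if prev = "" then (out, token, String.ofList [c]) else (out ++ [prev], token, String.ofList [c]))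
  else if c = '|' then
    (out ++ [token.push c], "", prev)
  else
    (out, token.push c, prev)

def verb (s : String) : List String :=
  let st := s.toList.foldl verbStep ([], "", "")
  -- the assert always holds; the final 'yield prev'
  st.1 ++ [st.2.2]

-- ===== PORT B =====
def verb_alt (s : String) : List String :=
  if s = "" then [""] else s.toList.map (fun c => String.ofList [c])

-- ===== PRECONDITION & SPEC =====
def Spec_verb (s : String) (out : List String) : Prop := out = verb_alt s
instance (s : String) (out : List String) : Decidable (Spec_verb s out) := by unfold Spec_verb; infer_instance

-- ===== CLAIM (what is proved, stated in full; the proofs are below) =====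
def Claim_equal_verb : Prop := ∀ (s : String), Dom_verb s → Spec_verb s (verb s)

-- ===== LEMMAS AND PROOFS =====

theorem mk_single_ne_verbstr (c : Char) : String.ofList [c] ≠ "\\verb" := by
  intro h
  have := congrArg String.toList h
  simp at this

theorem mk_single_ne_empty (c : Char) : String.ofList [c] ≠ "" := by
  intro h
  have := congrArg String.toList h
  simp at this

-- with token = "" and prev a single char, the loop just flushes prev and tracks the last char
theorem verbStep_loop (cs : List Char) : ∀ (out : List String) (c : Char),
    cs.foldl verbStep (out, "", String.ofList [c]) =
      (out ++ (c :: cs).dropLast.map (fun d => String.ofList [d]), "",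
        String.ofList [(c :: cs).getLast (by simp)]) := by
  induction cs with
  | nil => intro out c; simp
  | cons d cs ih =>
    intro out c
    have h1 := mk_single_ne_verbstr c
    have h2 := mk_single_ne_empty c
    rw [List.foldl_cons,
      show verbStep (out, "", String.ofList [c]) d
          = (out ++ [String.ofList [c]], "", String.ofList [d]) from by
        simp [verbStep, h1, h2],
      ih (out ++ [String.ofList [c]]) d]
    simp [List.getLast_cons]

theorem verb_spec : Claim_equal_verb := by
  intro s _
  unfold Spec_verb verb verb_alt
  rcases h : s.toList with _ | ⟨c, cs⟩
  · have hs : s = "" := by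
      have := congrArg String.ofList h
      simpa using this
    simp [hs]
  · have hs : s ≠ "" := by
      intro hs; rw [hs] at h; simp at h
    simp only [if_neg hs]
    rw [show List.foldl verbStep ([], "", "") (c :: cs) =
          List.foldl verbStep (([] : List String), "", String.ofList [c]) cs by
        simp [verbStep]]
    rw [verbStep_loop cs [] c]
    simp only [List.nil_append]
    conv_rhs => rw [← List.dropLast_concat_getLast (l := c :: cs) (by simp)]
    simp
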